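-- pv_equiv track=rewrite | github.com/jcbfshr/enigma | algo.py | format_english_list
-- ===== SOURCE A (Python) =====
-- def format_english_list(x):
--     string = ""
--     for i in range(len(x)):
--         string += x[i]
--         if i == (len(x)-2):
--             string += " or "
--         elif i != (len(x)-1):
--             string += ", "
--     return string
-- ===== SOURCE B (Python) =====
-- def format_english_list(x):
--     if len(x) <= 1:
--         return "".join(x)
--     return ", ".join(x[:-1]) + " or " + x[-1]
-- ===== Notes on version B (the rewrite author's own statement) =====
-- stated objective: simpler
-- what changed: Replaces the indexed loop with per-index penultimate/last branching by an early return for len<=1 plus a single ', '.join of the prefix concatenated with ' or ' and the last element.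
import Mathlib
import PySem

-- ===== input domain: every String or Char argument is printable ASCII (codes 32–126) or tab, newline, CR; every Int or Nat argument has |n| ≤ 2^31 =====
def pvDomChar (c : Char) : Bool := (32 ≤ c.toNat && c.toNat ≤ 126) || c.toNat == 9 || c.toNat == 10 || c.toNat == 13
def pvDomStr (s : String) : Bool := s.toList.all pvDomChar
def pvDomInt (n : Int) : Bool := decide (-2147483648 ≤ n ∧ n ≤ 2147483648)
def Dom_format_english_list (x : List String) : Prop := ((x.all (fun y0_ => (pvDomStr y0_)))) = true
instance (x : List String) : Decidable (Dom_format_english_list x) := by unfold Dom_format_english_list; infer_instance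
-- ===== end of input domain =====

-- B is a simpler decomposition: early return for len ≤ 1, else ", ".join(x[:-1]) + " or " + x[-1].
-- Both ports build the result on the List Char side (Lean's String.append is opaque to the kernel).

-- ===== PORT A =====
-- the loop body: string += x[i]; then the two branches on i vs len(x)-2 / len(x)-1
-- (x[i] is always in range here, so pyGetD is exact for Python's x[i])
def format_english_list (x : List String) : String :=
  String.ofList ((PySem.List.pyRange 0 (PySem.List.len x) 1).foldl
    (fun s i =>
      let s := s ++ (PySem.List.pyGetD x i "").toList
      if i = PySem.List.len x - 2 then s ++ (" or ".toList)
      else if i ≠ PySem.List.len x - 1 then s ++ (", ".toList)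
      else s) [])

-- ===== PORT B =====
-- x[-1] is in range in this branch (len ≥ 2), so the .getD default is never used
def format_english_list_alt (x : List String) : String :=
  if x.length ≤ 1 then
    String.ofList (PySem.Chars.join [] (x.map String.toList))
  else
    String.ofList (PySem.Chars.join ", ".toList
        ((PySem.List.slice x none (some (-1))).map String.toList)
      ++ " or ".toList ++ ((PySem.List.pyGet? x (-1)).getD "").toList)

-- ===== PRECONDITION & SPEC =====
def Spec_format_english_list (x : List String) (out : String) : Prop := out = format_english_list_alt x
instance (x : List String) (out : String) : Decidable (Spec_format_english_list x out) := by unfold Spec_format_english_list; infer_instance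

-- ===== CLAIM (what is proved, stated in full; the proofs are below) =====
def Claim_equal_format_english_list : Prop := ∀ (x : List String), Dom_format_english_list x → Spec_format_english_list x (format_english_list x)

-- ===== LEMMAS AND PROOFS =====

-- canonical form of the result, as a recursion on the list of char-lists
def pvSep : List (List Char) → List Char
  | [] => []
  | [a] => a
  | [a, b] => a ++ " or ".toList ++ b
  | a :: b :: c :: l => a ++ ", ".toList ++ pvSep (b :: c :: l)

lemma loopA (x : List String) : ∀ (k : Nat) (acc : List Char), k ≤ x.length →
    (PySem.List.pyRange (k : Int) (PySem.List.len x) 1).foldl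
      (fun s i =>
        let s := s ++ (PySem.List.pyGetD x i "").toList
        if i = PySem.List.len x - 2 then s ++ (" or ".toList)
        else if i ≠ PySem.List.len x - 1 then s ++ (", ".toList)
        else s) acc
    = acc ++ pvSep ((x.drop k).map String.toList) := by
  intro k
  induction hn : x.length - k generalizing k with
  | zero =>
    intro acc hk
    have hke : k = x.length := by omega
    subst hke
    rw [PySem.List.pyRange_one_eq_nil (by simp [PySem.List.len])]
    simp [pvSep]
  | succ n ih =>
    intro acc hk
    have hklt : k < x.length := by omega
    rw [PySem.List.pyRange_one_cons (by simp [PySem.List.len]; omega)]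
    simp only [List.foldl_cons]
    have hget : PySem.List.pyGetD x (k : Int) "" = x[k] := by
      rw [PySem.List.pyGetD_eq_getElem] <;> simp [hklt]
    have hdrop : x.drop k = x[k] :: x.drop (k + 1) := List.drop_eq_getElem_cons hklt
    have hlen : (x.drop (k+1)).length = x.length - (k+1) := by simp
    have hstep := ih (k + 1) (by omega)
    by_cases h2 : (k : Int) = PySem.List.len x - 2
    · -- penultimate index: two elements remain
      have hkeq : x.length = k + 2 := by simp [PySem.List.len] at h2; omega
      rw [if_pos h2]
      have : ((k : Nat) + 1 : Int) = (((k+1) : Nat) : Int) := by push_cast; ring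
      rw [this, hstep _ (by omega)]
      rcases hd : x.drop (k+1) with _ | ⟨b, l⟩
      · exfalso
        have h0 := congrArg List.length hd
        rw [List.length_drop] at h0
        simp at h0; omega
      · rcases hl : l with _ | ⟨c, l'⟩
        · subst hl
          rw [hdrop, hd]
          simp [pvSep, hget]
        · exfalso
          have h0 := congrArg List.length hd
          rw [List.length_drop] at h0
          simp [hl] at h0; omega
    · rw [if_neg h2]
      by_cases h1 : (k : Int) = PySem.List.len x - 1
      · -- last index: one element remains
        have hkeq : x.length = k + 1 := by simp [PySem.List.len] at h1; omega
        rw [if_neg (by simpa using h1)]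
        have : ((k : Nat) + 1 : Int) = (((k+1) : Nat) : Int) := by push_cast; ring
        rw [this, hstep _ (by omega)]
        have hd : x.drop (k+1) = [] := by
          apply List.eq_nil_of_length_eq_zero
          rw [List.length_drop]; omega
        rw [hdrop, hd]
        simp [pvSep, hget]
      · -- at least three elements remain
        rw [if_pos (by simpa using h1)]
        have hkle : k < x.length - 2 := by
          simp [PySem.List.len] at h1 h2; omega
        have : ((k : Nat) + 1 : Int) = (((k+1) : Nat) : Int) := by push_cast; ring
        rw [this, hstep _ (by omega)]
        rcases hd : x.drop (k+1) with _ | ⟨b, l⟩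
        · exfalso
          have h0 := congrArg List.length hd
          rw [List.length_drop] at h0
          simp at h0; omega
        rcases hl : l with _ | ⟨c, l'⟩
        · exfalso
          have h0 := congrArg List.length hd
          rw [List.length_drop] at h0
          simp [hl] at h0; omega
        rw [hdrop, hd, hl]
        simp [pvSep, hget]

lemma pyget_last (xs : List String) (hx : xs ≠ []) :
    PySem.List.pyGet? xs (-1) = xs.getLast? := by
  have hlen : 1 ≤ xs.length := List.length_pos_of_ne_nil hx
  simp only [PySem.List.pyGet?, PySem.List.pyIdx?]
  rw [if_neg (by omega), if_pos (by omega)]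
  simp [List.getLast?_eq_getElem?]

lemma sep_eq (p q : List Char) (rest : List (List Char)) :
    pvSep (p :: q :: rest)
      = PySem.Chars.join ", ".toList ((p :: q :: rest).dropLast)
        ++ " or ".toList ++ ((p :: q :: rest).getLast?.getD []) := by
  induction rest generalizing p q with
  | nil => simp [pvSep, PySem.Chars.join_singleton]
  | cons r rest ih =>
    rw [show pvSep (p :: q :: r :: rest) = p ++ ", ".toList ++ pvSep (q :: r :: rest) from rfl,
        ih q r,
        show (p :: q :: r :: rest).dropLast = p :: q :: (r :: rest).dropLast from rfl,
        show (q :: r :: rest).dropLast = q :: (r :: rest).dropLast from rfl,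
        PySem.Chars.join_cons_cons,
        List.getLast?_cons_cons]
    simp [List.append_assoc]

lemma altSep (x : List String) :
    format_english_list_alt x = String.ofList (pvSep (x.map String.toList)) := by
  unfold format_english_list_alt
  match x with
  | [] => simp [pvSep, PySem.Chars.join_nil]
  | [a] => simp [pvSep, PySem.Chars.join_singleton]
  | a :: b :: l =>
    rw [if_neg (by simp)]
    rw [List.map_cons, List.map_cons, sep_eq]
    rw [PySem.List.slice_to_neg_one, pyget_last _ (by simp)]
    congr 1
    have h1 : (a.toList :: b.toList :: l.map String.toList).dropLast
        = ((a :: b :: l).dropLast).map String.toList := by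
      rw [show (a.toList :: b.toList :: l.map String.toList)
            = (a :: b :: l).map String.toList from rfl, List.map_dropLast]
    have h2 : (a.toList :: b.toList :: l.map String.toList).getLast?.getD []
        = (((a :: b :: l).getLast?).getD "").toList := by
      rw [show (a.toList :: b.toList :: l.map String.toList)
            = (a :: b :: l).map String.toList from rfl, List.getLast?_map]
      cases h : (a :: b :: l).getLast? with
      | none => simp at h
      | some v => simp
    rw [h1, h2]

-- ===== VERDICT (by name: the statement is the Claim_ definition above) =====
theorem format_english_list_spec : Claim_equal_format_english_list := by
  intro x _
  unfold Spec_format_english_list format_english_list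
  rw [show (0 : Int) = ((0 : Nat) : Int) by simp, loopA x 0 [] (by omega)]
  simp [altSep]
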